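-- pv_equiv track=rewrite | github.com/nikoladze/aoc2021 | day19/solver.py | all_transformations1
-- ===== SOURCE A (Python) =====
-- def rotate(x, y, z, axis):
--     return [
--         (x, z, -y),
--         (z, y, -x),
--         (y, -x, z),
--     ][axis]
--
-- def rotate_n(x, y, z, axis, n):
--     for i in range(n):
--         x, y, z = rotate(x, y, z, axis)
--     return x, y, z
--
-- def flip(x, y, z, do_flip=True):
--     if not do_flip:
--         return x, y, z
--     return -x, y, z
--
-- def all_transformations1(x, y, z):
--     res = []
--     for axis_rotate in range(3):
--         for n_rotations in range(4):
--             for do_flip in [True, False]: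
--                 res.append(flip(
--                         *rotate_n(
--                             x, y, z,
--                             axis=axis_rotate,
--                             n=n_rotations,
--                         ),
--                         do_flip=do_flip,
--                     ))
--     return res
-- ===== SOURCE B (Python) =====
-- def _dot(r, v):
--     return r[0] * v[0] + r[1] * v[1] + r[2] * v[2]
--
-- def _apply(M, v):
--     return (_dot(M[0], v), _dot(M[1], v), _dot(M[2], v))
--
-- def _matmul(A, B):
--     cols = [(B[0][j], B[1][j], B[2][j]) for j in range(3)]
--     return tuple(tuple(_dot(A[i], c) for c in cols) for i in range(3))
--
-- _I = ((1, 0, 0), (0, 1, 0), (0, 0, 1))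
-- _F = ((-1, 0, 0), (0, 1, 0), (0, 0, 1))
-- _BASES = [
--     ((1, 0, 0), (0, 0, 1), (0, -1, 0)),   # rotate about axis 0: (x,y,z) -> (x,z,-y)
--     ((0, 0, 1), (0, 1, 0), (-1, 0, 0)),   # axis 1: (x,y,z) -> (z,y,-x)
--     ((0, 1, 0), (-1, 0, 0), (0, 0, 1)),   # axis 2: (x,y,z) -> (y,-x,z)
-- ]
--
-- def all_transformations1(x, y, z):
--     v = (x, y, z)
--     res = []
--     for R in _BASES:
--         M = _I
--         for _ in range(4):
--             res.append(_apply(_matmul(_F, M), v))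
--             res.append(_apply(M, v))
--             M = _matmul(R, M)
--     return res
-- ===== Notes on version B (the rewrite author's own statement) =====
-- stated objective: alternative
-- what changed: B builds each of the 24 transforms as a 3x3 integer matrix (powers of one base rotation per axis, left-multiplied by a flip matrix) and applies it to the vector, instead of A's repeated per-step coordinate rewriting via rotate/rotate_n/flip.
import Mathlib
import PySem

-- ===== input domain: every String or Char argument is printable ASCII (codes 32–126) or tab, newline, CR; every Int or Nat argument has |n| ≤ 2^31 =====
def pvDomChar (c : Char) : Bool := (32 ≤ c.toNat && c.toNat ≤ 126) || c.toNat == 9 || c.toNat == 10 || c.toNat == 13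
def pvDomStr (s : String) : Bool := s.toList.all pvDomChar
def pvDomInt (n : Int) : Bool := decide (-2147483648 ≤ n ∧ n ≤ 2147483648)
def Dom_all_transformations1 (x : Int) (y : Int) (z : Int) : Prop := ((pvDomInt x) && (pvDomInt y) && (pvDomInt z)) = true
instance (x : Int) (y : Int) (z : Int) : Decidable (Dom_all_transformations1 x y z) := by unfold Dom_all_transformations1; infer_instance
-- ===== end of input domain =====

-- B replaces A's repeated coordinate rewriting by 3x3 integer matrices (powers of a base
-- rotation, optionally flipped) applied to the vector; objective: idiomatic/alternative, same cost.

-- ===== PORT A =====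
def pvRotate (x y z axis : Int) : Int × Int × Int :=
  -- axis is always 0, 1 or 2 in this program, so .getD is never reached with its default
  (PySem.List.pyGet? [(x, z, -y), (z, y, -x), (y, -x, z)] axis).getD (x, y, z)

def pvRotateN (x y z axis n : Int) : Int × Int × Int :=
  (PySem.List.pyRange 0 n 1).foldl
    (fun (p : Int × Int × Int) _ => pvRotate p.1 p.2.1 p.2.2 axis) (x, y, z)

def pvFlip (x y z : Int) (do_flip : Bool) : Int × Int × Int :=
  if !do_flip then (x, y, z) else (-x, y, z)

def all_transformations1 (x : Int) (y : Int) (z : Int) : List (Int × Int × Int) :=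
  (PySem.List.pyRange 0 3 1).foldl (fun res axis =>
    (PySem.List.pyRange 0 4 1).foldl (fun res n =>
      [true, false].foldl (fun res df =>
        let p := pvRotateN x y z axis n
        res ++ [pvFlip p.1 p.2.1 p.2.2 df]) res) res) []

-- ===== PORT B =====
abbrev PvV3 := Int × Int × Int
abbrev PvM3 := PvV3 × PvV3 × PvV3

def pvDot (r v : PvV3) : Int := r.1 * v.1 + r.2.1 * v.2.1 + r.2.2 * v.2.2

def pvApply (M : PvM3) (v : PvV3) : PvV3 := (pvDot M.1 v, pvDot M.2.1 v, pvDot M.2.2 v)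

def pvMatmul (A B : PvM3) : PvM3 :=
  let c0 : PvV3 := (B.1.1, B.2.1.1, B.2.2.1)
  let c1 : PvV3 := (B.1.2.1, B.2.1.2.1, B.2.2.2.1)
  let c2 : PvV3 := (B.1.2.2, B.2.1.2.2, B.2.2.2.2)
  ((pvDot A.1 c0, pvDot A.1 c1, pvDot A.1 c2),
   (pvDot A.2.1 c0, pvDot A.2.1 c1, pvDot A.2.1 c2),
   (pvDot A.2.2 c0, pvDot A.2.2 c1, pvDot A.2.2 c2))

def pvI : PvM3 := ((1, 0, 0), (0, 1, 0), (0, 0, 1))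
def pvF : PvM3 := ((-1, 0, 0), (0, 1, 0), (0, 0, 1))
def pvBases : List PvM3 :=
  [((1, 0, 0), (0, 0, 1), (0, -1, 0)),
   ((0, 0, 1), (0, 1, 0), (-1, 0, 0)),
   ((0, 1, 0), (-1, 0, 0), (0, 0, 1))]

def all_transformations1_alt (x : Int) (y : Int) (z : Int) : List (Int × Int × Int) :=
  let v : PvV3 := (x, y, z)
  (pvBases.foldl (fun res R =>
    ((List.range 4).foldl
      (fun (st : List PvV3 × PvM3) _ =>
        (st.1 ++ [pvApply (pvMatmul pvF st.2) v, pvApply st.2 v], pvMatmul R st.2))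
      (res, pvI)).1) [])

-- ===== PRECONDITION & SPEC =====
def Spec_all_transformations1 (x : Int) (y : Int) (z : Int) (out : List (Int × Int × Int)) : Prop := out = all_transformations1_alt x y z
instance (x : Int) (y : Int) (z : Int) (out : List (Int × Int × Int)) : Decidable (Spec_all_transformations1 x y z out) := by unfold Spec_all_transformations1; infer_instance

-- ===== CLAIM (what is proved, stated in full; the proofs are below) =====
def Claim_equal_all_transformations1 : Prop := ∀ (x : Int) (y : Int) (z : Int), Dom_all_transformations1 x y z → Spec_all_transformations1 x y z (all_transformations1 x y z)

-- ===== LEMMAS AND PROOFS =====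

-- ===== VERDICT (by name: the statement is the Claim_ definition above) =====
theorem all_transformations1_spec : Claim_equal_all_transformations1 := by
  intro x y z _
  show _ = _
  simp [all_transformations1, all_transformations1_alt, pvRotate, pvRotateN, pvFlip,
        pvDot, pvApply, pvMatmul, pvI, pvF, pvBases, PySem.List.pyRange, PySem.List.pyGet?,
        PySem.List.pyIdx?, List.range, List.range.loop, List.map, List.foldl]
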